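-- pv_equiv track=rewrite | github.com/Mtuwn/KTLT | BaiTap/cau24.py | count
-- ===== SOURCE A (Python) =====
-- import math
--
-- def isPrime(n):
--     if n <= 1: return False
--     if n == 2: return True
--     else:
--         for i in range(2, math.ceil(math.sqrt(n) +1)):
--             if n % i == 0:
--                 return False
--     return True
--
-- def count(a,b,s1,s2):
--     S = []
--     for i in s1:
--         for j in s2:
--             sum = i+j
--             if sum >= a and sum <= b and isPrime(sum):
--                 if sum  not in S:
--                     S.append(sum)
--     return S
-- ===== SOURCE B (Python) =====
-- import math
--
-- def _sieve(k):
--     comp = [False] * (k + 1)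
--     primes = []
--     for p in range(2, k + 1):
--         if not comp[p]:
--             primes.append(p)
--             for m in range(p * p, k + 1, p):
--                 comp[m] = True
--     return primes
--
-- def count(a, b, s1, s2):
--     # stage 1: pair sums inside [a, b], in scan order
--     sums = [i + j for i in s1 for j in s2 if a <= i + j <= b]
--     # stage 2: keep first occurrences only
--     seen = set()
--     cands = []
--     for t in sums:
--         if t not in seen:
--             seen.add(t)
--             cands.append(t)
--     # stage 3: sieve primes up to isqrt of the largest candidate,
--     # then test each distinct candidate by prime divisors only
--     big = 0
--     for t in cands:
--         if t > big:
--             big = t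
--     primes = _sieve(math.isqrt(big))
--     return [n for n in cands
--             if n >= 2 and all(n % p != 0 for p in primes if p * p <= n)]
-- ===== Notes on version B (the rewrite author's own statement) =====
-- stated objective: alternative
-- what changed: B is staged instead of interleaved: it collects the in-range pair sums, deduplicates them once with a set, then builds a sieve of Eratosthenes up to isqrt of the largest candidate and tests primality once per distinct candidate by dividing by sieve primes only, whereas A runs a ceil(sqrt)-bounded trial division for every pair occurrence and dedups with an O(|S|) list scan.
import Mathlib
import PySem

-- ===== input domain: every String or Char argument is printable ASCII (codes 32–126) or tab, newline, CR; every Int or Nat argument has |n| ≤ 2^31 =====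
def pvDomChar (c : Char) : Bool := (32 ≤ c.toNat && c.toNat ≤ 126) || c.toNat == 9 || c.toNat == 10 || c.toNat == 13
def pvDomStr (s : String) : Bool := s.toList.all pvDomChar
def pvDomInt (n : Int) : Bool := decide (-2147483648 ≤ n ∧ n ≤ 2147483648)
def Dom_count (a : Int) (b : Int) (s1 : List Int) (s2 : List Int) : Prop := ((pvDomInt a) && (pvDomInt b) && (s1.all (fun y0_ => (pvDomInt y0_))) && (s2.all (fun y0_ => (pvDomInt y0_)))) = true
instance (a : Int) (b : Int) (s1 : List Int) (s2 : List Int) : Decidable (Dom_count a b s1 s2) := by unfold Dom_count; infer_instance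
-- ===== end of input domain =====

-- B replaces A's interleaved scan (trial division per pair occurrence + O(|S|) list-membership
-- dedup) by staged passes: collect in-range sums, dedup once with a set, then test primality
-- only once per DISTINCT candidate against a sieve of Eratosthenes built up to isqrt(max).

-- ===== PORT A =====
-- models math.ceil(math.sqrt(n) + 1): exact for 0 ≤ n ≤ 2^32 (double sqrt is correctly
-- rounded there and its distance to the nearest integer, ≥ ~2^-17 for non-squares, far
-- exceeds the half-ulp ≤ 2^-36, so the ceil is the one computed from the exact sqrt).
def ceilSqrtP1 (n : Int) : Int :=
  let r := Nat.sqrt n.toNat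
  if r * r == n.toNat then (r : Int) + 1 else (r : Int) + 2

def isPrimeA (n : Int) : Bool :=
  if n ≤ 1 then false
  else if n == 2 then true
  else (PySem.List.pyRange 2 (ceilSqrtP1 n) 1).all (fun i => !(PySem.Int.mod n i == 0))

def count (a : Int) (b : Int) (s1 : List Int) (s2 : List Int) : List Int :=
  s1.foldl (fun S i =>
    s2.foldl (fun S j =>
      let sum := i + j
      if decide (sum ≥ a) && decide (sum ≤ b) && isPrimeA sum then
        (if S.contains sum then S else S ++ [sum])
      else S) S) []

-- ===== PORT B =====
-- loop body of _sieve: for p in range(2, k+1): if not comp[p]: append p; mark multiples.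
-- comp is the Python list of booleans (an array; comp[m] = True is setIfInBounds, always in range);
-- range(p*p, k+1, p) is List.range' (p*p) ((k + 1 - p*p + p - 1) / p) p (same elements, step p).
def sieveStep (k : Nat) (st : Array Bool × List Nat) (p : Nat) : Array Bool × List Nat :=
  if st.1.getD p false then st
  else ((List.range' (p*p) ((k + 1 - p*p + p - 1) / p) p).foldl (fun c m => c.setIfInBounds m true) st.1,
        st.2 ++ [p])

def sieve (k : Nat) : List Nat :=
  ((List.range' 2 (k+1-2)).foldl (sieveStep k) (Array.replicate (k+1) false, [])).2

def inRangeB (a : Int) (b : Int) (t : Int) : Bool := decide (a ≤ t) && decide (t ≤ b)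

def count_alt (a : Int) (b : Int) (s1 : List Int) (s2 : List Int) : List Int :=
  let sums := s1.flatMap (fun i => (s2.map (fun j => i + j)).filter (inRangeB a b))
  let cands := (sums.foldl (fun (st : PySem.Set Int × List Int) t =>
      if PySem.Set.contains st.1 t then st else (PySem.Set.add st.1 t, st.2 ++ [t]))
      ((PySem.Set.empty : PySem.Set Int), ([] : List Int))).2
  let big := cands.foldl (fun m t => if t > m then t else m) (0 : Int)
  let primes := sieve (Nat.sqrt big.toNat)   -- math.isqrt(big), big ≥ 0
  cands.filter (fun n => decide (2 ≤ n) &&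
    (primes.filter (fun p : Nat => decide ((p:Int)*(p:Int) ≤ n))).all
      (fun p : Nat => !(PySem.Int.mod n (p:Int) == 0)))

-- ===== PRECONDITION & SPEC =====
def Spec_count (a : Int) (b : Int) (s1 : List Int) (s2 : List Int) (out : List Int) : Prop := out = count_alt a b s1 s2
instance (a : Int) (b : Int) (s1 : List Int) (s2 : List Int) (out : List Int) : Decidable (Spec_count a b s1 s2 out) := by unfold Spec_count; infer_instance

-- ===== CLAIM (what is proved, stated in full; the proofs are below) =====
def Claim_equal_count : Prop := ∀ (a : Int) (b : Int) (s1 : List Int) (s2 : List Int), Dom_count a b s1 s2 → Spec_count a b s1 s2 (count a b s1 s2)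

-- ===== LEMMAS AND PROOFS =====

-- ---------- A's primality test characterised ----------
lemma noDiv_iff (m : Nat) (hm : 3 ≤ m) :
    (∀ k, 2 ≤ k → k < (if Nat.sqrt m * Nat.sqrt m = m then Nat.sqrt m + 1 else Nat.sqrt m + 2) → ¬ k ∣ m)
      ↔ m.Prime := by
  have hsq : Nat.sqrt m * Nat.sqrt m ≤ m := by
    have := Nat.sqrt_le' m
    simpa [pow_two] using this
  constructor
  · intro h
    rw [Nat.prime_def_le_sqrt]
    exact ⟨by omega, fun k hk hk2 => h k hk (by split_ifs <;> omega)⟩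
  · intro hp k hk hlt hdvd
    rcases hp.eq_one_or_self_of_dvd k hdvd with h1 | h1
    · omega
    · rw [h1] at hlt
      set r := Nat.sqrt m with hr
      split_ifs at hlt with hs
      · have hrdvd : r ∣ m := ⟨r, hs.symm⟩
        rcases hp.eq_one_or_self_of_dvd r hrdvd with h2 | h2
        · omega
        · rw [h2] at hs
          nlinarith
      · by_cases hr2 : 2 ≤ r
        · have h2r : 2 * r ≤ r * r := by nlinarith
          omega
        · omega

lemma isPrimeA_iff (n : Int) : isPrimeA n = true ↔ 2 ≤ n ∧ Nat.Prime n.toNat := by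
  unfold isPrimeA
  split_ifs with h1 h2
  · simp only [false_iff, not_and]
    omega
  · simp only [beq_iff_eq] at h2
    subst h2
    simp [Nat.prime_two]
  · simp only [beq_iff_eq] at h2
    have hn3 : 3 ≤ n := by omega
    have hm3 : 3 ≤ n.toNat := by omega
    set bN : Nat := (if Nat.sqrt n.toNat * Nat.sqrt n.toNat = n.toNat then Nat.sqrt n.toNat + 1
        else Nat.sqrt n.toNat + 2) with hbN
    have hceil : ceilSqrtP1 n = ((bN : Nat) : Int) := by
      rw [hbN]
      simp only [ceilSqrtP1, beq_iff_eq]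
      split_ifs <;> push_cast <;> ring
    rw [List.all_eq_true]
    have hmod : ∀ i : Int, 2 ≤ i → ((PySem.Int.mod n i == 0) = true ↔ i.toNat ∣ n.toNat) := by
      intro i hi
      rw [PySem.Int.mod_eq_emod_of_pos (by omega), beq_iff_eq]
      have hiff : n % i = 0 ↔ i ∣ n := ⟨Int.dvd_of_emod_eq_zero, Int.emod_eq_zero_of_dvd⟩
      rw [hiff]
      have hi' : ((i.toNat : Nat) : Int) = i := Int.toNat_of_nonneg (by omega)
      have hn' : ((n.toNat : Nat) : Int) = n := Int.toNat_of_nonneg (by omega)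
      rw [← hi', ← hn', Int.natCast_dvd_natCast]
      simp only [Int.toNat_natCast]
    constructor
    · intro h
      refine ⟨by omega, (noDiv_iff n.toNat hm3).mp ?_⟩
      intro k hk hklt hdvd
      have hmem : (k : Int) ∈ PySem.List.pyRange 2 (ceilSqrtP1 n) 1 := by
        rw [PySem.List.mem_pyRange_one, hceil]
        exact ⟨by exact_mod_cast hk, by exact_mod_cast hklt⟩
      have hk2 : (2 : Int) ≤ (k : Int) := by exact_mod_cast hk
      have heq : (PySem.Int.mod n (k : Int) == 0) = true :=
        (hmod _ hk2).mpr (by simpa using hdvd)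
      simpa [heq] using h _ hmem
    · rintro ⟨-, hp⟩ i hi
      rw [PySem.List.mem_pyRange_one, hceil] at hi
      obtain ⟨hi2, hilt⟩ := hi
      have hnd : ¬ (i.toNat ∣ n.toNat) :=
        (noDiv_iff n.toNat hm3).mpr hp i.toNat (by omega) (by omega)
      cases hb : (PySem.Int.mod n i == 0) with
      | false => simp
      | true => exact absurd ((hmod i hi2).mp hb) hnd

-- ---------- the sieve: soundness of marking, completeness of the prime list ----------
def SoundC (c : Array Bool) : Prop := ∀ m, c.getD m false = true → ¬ Nat.Prime m

lemma aset_getD (c : Array Bool) (i j : Nat) :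
    (c.setIfInBounds i true).getD j false = true → j = i ∨ c.getD j false = true := by
  intro h
  rw [Array.getD_eq_getD_getElem?, Array.getElem?_setIfInBounds] at h
  by_cases hij : i = j
  · exact Or.inl hij.symm
  · right
    rw [Array.getD_eq_getD_getElem?]
    simpa [hij] using h

lemma replicate_sound (k : Nat) : SoundC (Array.replicate (k+1) false) := by
  intro m hm
  exfalso
  rw [Array.getD_eq_getD_getElem?] at hm
  rcases h : (Array.replicate (k+1) false)[m]? with _ | b
  · rw [h] at hm; exact absurd hm (by simp)
  · obtain ⟨hlt, hb⟩ := Array.getElem?_eq_some_iff.mp h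
    simp at hb
    rw [h] at hm
    simp [hb] at hm

lemma mark_sound (l : List Nat) (c : Array Bool) (hl : ∀ m ∈ l, ¬ Nat.Prime m)
    (hc : SoundC c) : SoundC (l.foldl (fun c m => c.setIfInBounds m true) c) := by
  induction l generalizing c with
  | nil => exact hc
  | cons m rest ih =>
      simp only [List.foldl_cons]
      refine ih _ (fun x hx => hl x (by simp [hx])) ?_
      intro x hx
      rcases aset_getD c m x hx with h | h
      · exact h ▸ hl m (by simp)
      · exact hc x h

lemma range'_not_prime (p : Nat) (hp : 2 ≤ p) (len : Nat) (m : Nat)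
    (hm : m ∈ List.range' (p*p) len p) : ¬ Nat.Prime m := by
  rw [List.mem_range'] at hm
  obtain ⟨i, -, hmi⟩ := hm
  intro hpr
  have hdvd : p ∣ m := ⟨p + i, by rw [hmi]; ring⟩
  rcases hpr.eq_one_or_self_of_dvd p hdvd with h | h
  · omega
  · nlinarith

lemma sieve_fold (k : Nat) (l : List Nat) (st : Array Bool × List Nat)
    (hs : SoundC st.1) (hl : ∀ p ∈ l, 2 ≤ p) :
    SoundC (l.foldl (sieveStep k) st).1
    ∧ (∀ q ∈ st.2, q ∈ (l.foldl (sieveStep k) st).2)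
    ∧ (∀ q ∈ l, Nat.Prime q → q ∈ (l.foldl (sieveStep k) st).2)
    ∧ ((∀ q ∈ st.2, 2 ≤ q) → ∀ q ∈ (l.foldl (sieveStep k) st).2, 2 ≤ q) := by
  induction l generalizing st with
  | nil => exact ⟨hs, fun q hq => hq, by simp, fun h => h⟩
  | cons p rest ih =>
      have hp2 : 2 ≤ p := hl p (by simp)
      simp only [List.foldl_cons]
      by_cases hcomp : st.1.getD p false = true
      · have hstep : sieveStep k st p = st := by unfold sieveStep; rw [if_pos hcomp]
        rw [hstep]
        obtain ⟨i1, i2, i3, i4⟩ := ih st hs (fun q hq => hl q (by simp [hq]))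
        refine ⟨i1, i2, ?_, i4⟩
        intro q hq hqp
        rcases List.mem_cons.mp hq with rfl | hq'
        · exact absurd hqp (hs q hcomp)
        · exact i3 q hq' hqp
      · have hstep : sieveStep k st p
            = ((List.range' (p*p) ((k + 1 - p*p + p - 1) / p) p).foldl (fun c m => c.setIfInBounds m true) st.1,
               st.2 ++ [p]) := by unfold sieveStep; rw [if_neg hcomp]
        rw [hstep]
        have hs' : SoundC ((List.range' (p*p) ((k + 1 - p*p + p - 1) / p) p).foldl (fun c m => c.setIfInBounds m true) st.1) :=
          mark_sound _ st.1 (fun m hm => range'_not_prime p hp2 _ m hm) hs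
        obtain ⟨i1, i2, i3, i4⟩ := ih ((List.range' (p*p) ((k + 1 - p*p + p - 1) / p) p).foldl (fun c m => c.setIfInBounds m true) st.1, st.2 ++ [p]) hs' (fun q hq => hl q (by simp [hq]))
        refine ⟨i1, ?_, ?_, ?_⟩
        · intro q hq
          exact i2 q (by simp [hq])
        · intro q hq hqp
          rcases List.mem_cons.mp hq with rfl | hq'
          · exact i2 q (by simp)
          · exact i3 q hq' hqp
        · intro hall q hq
          refine i4 ?_ q hq
          intro x hx
          rcases List.mem_append.mp hx with hx | hx
          · exact hall x hx
          · simp at hx; omega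

lemma sieve_complete (k q : Nat) (hq : Nat.Prime q) (hqk : q ≤ k) : q ∈ sieve k := by
  have h2 : 2 ≤ q := hq.two_le
  have hmem : q ∈ List.range' 2 (k+1-2) := by
    rw [List.mem_range'_1]; omega
  have := sieve_fold k (List.range' 2 (k+1-2)) (Array.replicate (k+1) false, [])
      (replicate_sound k) (fun p hp => by rw [List.mem_range'_1] at hp; omega)
  exact this.2.2.1 q hmem hq

lemma sieve_ge2 (k q : Nat) (hq : q ∈ sieve k) : 2 ≤ q := by
  have := sieve_fold k (List.range' 2 (k+1-2)) (Array.replicate (k+1) false, [])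
      (replicate_sound k) (fun p hp => by rw [List.mem_range'_1] at hp; omega)
  exact this.2.2.2 (by simp) q hq

-- B's per-candidate test agrees with primality when the sieve reaches isqrt(n)
lemma testB_iff (k : Nat) (n : Int) (hk : 2 ≤ n → Nat.sqrt n.toNat ≤ k) :
    (decide (2 ≤ n) && ((sieve k).filter (fun p : Nat => decide ((p:Int)*(p:Int) ≤ n))).all
        (fun p : Nat => !(PySem.Int.mod n (p:Int) == 0))) = true
      ↔ 2 ≤ n ∧ Nat.Prime n.toNat := by
  by_cases h2 : 2 ≤ n
  · simp only [h2, decide_true, Bool.true_and, true_and, List.all_eq_true, List.mem_filter]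
    have hmodiff : ∀ p : Nat, 2 ≤ p → ((PySem.Int.mod n (p:Int) == 0) = true ↔ p ∣ n.toNat) := by
      intro p hp
      rw [PySem.Int.mod_eq_emod_of_pos (by exact_mod_cast Nat.lt_of_lt_of_le (by norm_num) hp), beq_iff_eq]
      have hiff : n % (p:Int) = 0 ↔ (p:Int) ∣ n := ⟨Int.dvd_of_emod_eq_zero, Int.emod_eq_zero_of_dvd⟩
      rw [hiff]
      have hn' : ((n.toNat : Nat) : Int) = n := Int.toNat_of_nonneg (by omega)
      rw [← hn', Int.natCast_dvd_natCast]
      simp only [Int.toNat_natCast]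
    constructor
    · intro h
      by_contra hnp
      have hmf := Nat.minFac_prime (n := n.toNat) (by omega)
      have hdvd := Nat.minFac_dvd n.toNat
      have hsq : n.toNat.minFac * n.toNat.minFac ≤ n.toNat := by
        have := Nat.minFac_sq_le_self (n := n.toNat) (by omega) hnp
        simpa [pow_two] using this
      have hle : n.toNat.minFac ≤ Nat.sqrt n.toNat := by
        rw [Nat.le_sqrt]; simpa [pow_two] using hsq
      have hmem : n.toNat.minFac ∈ sieve k := sieve_complete k _ hmf (le_trans hle (hk h2))
      have hsqI : ((n.toNat.minFac : Nat) : Int) * ((n.toNat.minFac : Nat) : Int) ≤ n := by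
        have hn' : ((n.toNat : Nat) : Int) = n := Int.toNat_of_nonneg (by omega)
        rw [← hn']
        exact_mod_cast hsq
      have := h _ ⟨hmem, by simpa using hsqI⟩
      rw [Bool.not_eq_eq_eq_not, Bool.not_true] at this
      exact absurd ((hmodiff _ hmf.two_le).mpr hdvd) (by simp [this])
    · rintro hp p ⟨hmem, hsq⟩
      have hp2 : 2 ≤ p := sieve_ge2 k p hmem
      rw [Bool.not_eq_eq_eq_not, Bool.not_true, ← Bool.not_eq_true, hmodiff p hp2]
      intro hdvd
      rcases hp.eq_one_or_self_of_dvd p hdvd with h | h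
      · omega
      · rw [h] at hsq hp2
        have hle : ((n.toNat : Nat) : Int) * ((n.toNat : Nat) : Int) ≤ n := by simpa using hsq
        have hn' : ((n.toNat : Nat) : Int) = n := Int.toNat_of_nonneg (by omega)
        rw [← hn'] at hle
        have hfin : n.toNat * n.toNat ≤ n.toNat := by exact_mod_cast hle
        nlinarith
  · simp [h2]

-- ---------- dedup-with-filter machinery relating the two shapes ----------
def condA (a b t : Int) : Bool := decide (t ≥ a) && decide (t ≤ b) && isPrimeA t

def dflt (cond : Int → Bool) : List Int → List Int → List Int
  | acc, [] => acc
  | acc, t :: ts =>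
      if cond t then (if acc.contains t then dflt cond acc ts else dflt cond (acc ++ [t]) ts)
      else dflt cond acc ts

def dedupF : List Int → List Int → List Int
  | acc, [] => acc
  | acc, t :: ts => if acc.contains t then dedupF acc ts else dedupF (acc ++ [t]) ts

lemma foldA_inner (a b i : Int) (s2 : List Int) (S : List Int) :
    s2.foldl (fun S j =>
      let sum := i + j
      if decide (sum ≥ a) && decide (sum ≤ b) && isPrimeA sum then
        (if S.contains sum then S else S ++ [sum])
      else S) S = dflt (condA a b) S (s2.map (fun j => i + j)) := by
  induction s2 generalizing S with
  | nil => rfl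
  | cons j rest ih =>
      simp only [List.foldl_cons, List.map_cons, dflt, condA]
      by_cases hc : (decide (i + j ≥ a) && decide (i + j ≤ b) && isPrimeA (i + j)) = true
      · rw [if_pos hc, if_pos hc]
        by_cases hm : S.contains (i + j) = true
        · rw [if_pos hm, if_pos hm, ih]
        · rw [if_neg hm, if_neg hm, ih]
      · rw [if_neg hc, if_neg hc, ih]

lemma dflt_append (cond : Int → Bool) (l1 l2 : List Int) (acc : List Int) :
    dflt cond acc (l1 ++ l2) = dflt cond (dflt cond acc l1) l2 := by
  induction l1 generalizing acc with
  | nil => rfl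
  | cons t ts ih =>
      simp only [List.cons_append, dflt]
      split_ifs <;> apply ih

lemma foldA_outer (a b : Int) (s1 s2 : List Int) (S : List Int) :
    s1.foldl (fun S i =>
      s2.foldl (fun S j =>
        let sum := i + j
        if decide (sum ≥ a) && decide (sum ≤ b) && isPrimeA sum then
          (if S.contains sum then S else S ++ [sum])
        else S) S) S
    = dflt (condA a b) S (s1.flatMap (fun i => s2.map (fun j => i + j))) := by
  induction s1 generalizing S with
  | nil => rfl
  | cons i rest ih =>
      simp only [List.foldl_cons, List.flatMap_cons, dflt_append]
      rw [foldA_inner, ih]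

lemma dflt_filter (cond : Int → Bool) (l acc : List Int) :
    dflt cond acc l = dedupF acc (l.filter cond) := by
  induction l generalizing acc with
  | nil => rfl
  | cons t ts ih =>
      by_cases hc : cond t = true
      · simp only [dflt, List.filter_cons, hc, if_pos, dedupF]
        split_ifs <;> apply ih
      · simp only [dflt, List.filter_cons, hc]
        rw [if_neg (by simp), ih]
        simp

lemma contains_filter (p : Int → Bool) (acc : List Int) (t : Int) (hp : p t = true) :
    (acc.filter p).contains t = acc.contains t := by
  rw [Bool.eq_iff_iff]
  simp [List.mem_filter, hp]

lemma dedupF_filter (p : Int → Bool) (l acc : List Int) :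
    dedupF (acc.filter p) (l.filter p) = (dedupF acc l).filter p := by
  induction l generalizing acc with
  | nil => rfl
  | cons t ts ih =>
      by_cases hc : p t = true
      · simp only [List.filter_cons, hc, if_pos, dedupF, contains_filter p acc t hc]
        by_cases hm : acc.contains t = true
        · rw [if_pos hm, if_pos hm, ih]
        · rw [if_neg hm, if_neg hm, ← ih]
          congr 1
          simp [List.filter_append, hc]
      · simp only [List.filter_cons, hc]
        rw [if_neg (by simp)]
        simp only [dedupF]
        by_cases hm : acc.contains t = true
        · rw [if_pos hm, ih]
        · rw [if_neg hm, ← ih]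
          congr 1
          simp [List.filter_append, hc]

-- B's set/list fold computes dedupF
lemma setfold_eq (l : List Int) (seen : PySem.Set Int) (out : List Int)
    (hinv : ∀ x : Int, x ∈ seen ↔ x ∈ out) :
    (l.foldl (fun (st : PySem.Set Int × List Int) t =>
        if PySem.Set.contains st.1 t then st else (PySem.Set.add st.1 t, st.2 ++ [t]))
      (seen, out)).2 = dedupF out l := by
  induction l generalizing seen out with
  | nil => rfl
  | cons t ts ih =>
      have hm : PySem.Set.contains seen t = out.contains t := by
        rw [Bool.eq_iff_iff]
        simp [PySem.Set.contains, hinv]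
      simp only [List.foldl_cons, dedupF, hm]
      by_cases hc : out.contains t = true
      · rw [if_pos hc, if_pos hc]
        exact ih seen out hinv
      · rw [if_neg hc, if_neg hc]
        exact ih _ _ (by intro x; simp [PySem.Set.mem_add, hinv])

-- comprehension [i+j … if a≤i+j≤b] = filter of the flat pair list
lemma filter_flatMap_eq (p : Int → Bool) (s1 : List Int) (f : Int → List Int) :
    (s1.flatMap (fun i => (f i).filter p)) = (s1.flatMap f).filter p := by
  induction s1 with
  | nil => rfl
  | cons i rest ih => simp [List.flatMap_cons, List.filter_append, ih]

-- every member of l is ≤ the running max fold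
lemma le_foldmax (l : List Int) (m0 : Int) :
    (∀ t ∈ l, t ≤ l.foldl (fun m t => if t > m then t else m) m0)
    ∧ m0 ≤ l.foldl (fun m t => if t > m then t else m) m0 := by
  induction l generalizing m0 with
  | nil => exact ⟨by simp, le_refl _⟩
  | cons t ts ih =>
      simp only [List.foldl_cons]
      obtain ⟨h1, h2⟩ := ih (if t > m0 then t else m0)
      constructor
      · intro x hx
        rcases List.mem_cons.mp hx with rfl | hx'
        · exact le_trans (by split_ifs <;> omega) h2
        · exact h1 x hx'
      · exact le_trans (by split_ifs <;> omega) h2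

-- ===== VERDICT (by name: the statement is the Claim_ definition above) =====
theorem count_spec : Claim_equal_count := by
  intro a b s1 s2 _
  unfold Spec_count count count_alt
  simp only []
  rw [foldA_outer, filter_flatMap_eq (inRangeB a b) s1 (fun i => s2.map (fun j => i + j))]
  set pairs := s1.flatMap (fun i => s2.map (fun j => i + j)) with hpairs
  rw [dflt_filter]
  have hcond : pairs.filter (condA a b) = (pairs.filter (inRangeB a b)).filter isPrimeA := by
    rw [List.filter_filter]
    apply List.filter_congr
    intro t _
    by_cases h1 : a ≤ t <;> by_cases h2 : t ≤ b <;>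
      cases hp : isPrimeA t <;> simp [condA, inRangeB, h1, h2, hp, ge_iff_le]
  rw [hcond]
  have hded : dedupF [] ((pairs.filter (inRangeB a b)).filter isPrimeA)
      = (dedupF [] (pairs.filter (inRangeB a b))).filter isPrimeA := by
    have := dedupF_filter isPrimeA (pairs.filter (inRangeB a b)) []
    simpa using this
  rw [hded]
  rw [setfold_eq _ PySem.Set.empty [] (by simp [PySem.Set.empty])]
  set cands := dedupF [] (pairs.filter (inRangeB a b)) with hcands
  set big := cands.foldl (fun m t => if t > m then t else m) (0 : Int) with hbig
  apply List.filter_congr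
  intro n hn
  have hnb : n ≤ big := (le_foldmax cands 0).1 n hn
  have hb0 : (0 : Int) ≤ big := (le_foldmax cands 0).2
  have hk : 2 ≤ n → Nat.sqrt n.toNat ≤ Nat.sqrt big.toNat :=
    fun h2 => Nat.sqrt_le_sqrt (by omega)
  rw [Bool.eq_iff_iff, isPrimeA_iff, testB_iff _ n hk]
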